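-- pv_equiv track=rewrite | github.com/dvdocumentation/pelican_dbms | pelicandb.py | read_command
-- ===== SOURCE A (Python) =====
-- def read_command(collection_set):
--     uid = None
--     command = None
--     parameter = None
--     for key, value in collection_set.items():
--         if key == "uid":
--             uid = value
--         else:
--             command = key
--             parameter = value
--
--     return uid,command,parameter
-- ===== SOURCE B (Python) =====
-- def read_command(collection_set):
--     uid = collection_set.get("uid")
--     command = None
--     parameter = None
--     for key in reversed(collection_set):
--         if key != "uid":
--             command = key
--             parameter = collection_set[key]
--             break
--     return uid, command, parameter
-- ===== Notes on version B (the rewrite author's own statement) =====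
-- stated objective: simpler
-- what changed: B replaces A's single full forward pass with accumulator overwriting by a direct dict lookup for uid plus an early-terminating reverse scan that stops at the first non-uid key.
import Mathlib
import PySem

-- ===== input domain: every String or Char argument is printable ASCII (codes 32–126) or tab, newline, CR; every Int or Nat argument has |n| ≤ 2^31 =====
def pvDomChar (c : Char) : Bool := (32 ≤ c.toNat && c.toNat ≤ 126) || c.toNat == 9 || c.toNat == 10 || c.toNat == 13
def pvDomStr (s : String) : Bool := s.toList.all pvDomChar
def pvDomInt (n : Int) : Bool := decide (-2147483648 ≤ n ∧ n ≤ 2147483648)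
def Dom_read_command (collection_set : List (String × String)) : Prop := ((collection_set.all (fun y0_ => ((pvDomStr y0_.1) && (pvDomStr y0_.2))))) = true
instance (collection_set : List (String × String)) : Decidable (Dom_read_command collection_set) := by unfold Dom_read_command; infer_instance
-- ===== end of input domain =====

-- B replaces A's single full forward pass by a direct uid lookup plus an early-terminating
-- reverse scan for the last non-uid key; objective: simpler decomposition (same cost).


-- ===== PORT A =====
-- one loop over the dict items, overwriting (uid, command, parameter)
def stepA (s : Option String × Option String × Option String) (kv : String × String) :
    Option String × Option String × Option String :=
  if kv.1 == "uid" then (some kv.2, s.2.1, s.2.2) else (s.1, some kv.1, some kv.2)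

def read_command (collection_set : List (String × String)) : Option String × Option String × Option String :=
  collection_set.foldl stepA (none, none, none)

-- ===== PORT B =====
-- reverse scan breaking at the first key ≠ "uid"  (for key in reversed(collection_set): …)
def revScanB : List (String × String) → Option (String × String)
  | [] => none
  | kv :: rest => if kv.1 != "uid" then some kv else revScanB rest

def read_command_alt (collection_set : List (String × String)) : Option String × Option String × Option String :=
  let d := PySem.Dict.mk collection_set
  let uid := d.get? "uid"
  match revScanB collection_set.reverse with
  | none => (uid, none, none)
  | some kv => (uid, some kv.1, d.get? kv.1)

-- ===== PRECONDITION & SPEC =====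
-- A's argument is a Python dict, whose keys are unique; Pre_ excludes association lists with
-- duplicate keys, which represent no dict input of A (there the list is an ambiguous encoding).
def Pre_read_command (collection_set : List (String × String)) : Prop :=
  (collection_set.map Prod.fst).Nodup
instance (collection_set : List (String × String)) : Decidable (Pre_read_command collection_set) := by unfold Pre_read_command; infer_instance

def pvWitness_read_command : (List (String × String)) := [("uid", "u7"), ("set", "42")]

def Spec_read_command (collection_set : List (String × String)) (out : Option String × Option String × Option String) : Prop := out = read_command_alt collection_set
instance (collection_set : List (String × String)) (out : Option String × Option String × Option String) : Decidable (Spec_read_command collection_set out) := by unfold Spec_read_command; infer_instance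

-- ===== CLAIM (what is proved, stated in full; the proofs are below) =====
def Claim_equal_read_command : Prop := ∀ (collection_set : List (String × String)), Dom_read_command collection_set → Pre_read_command collection_set → Spec_read_command collection_set (read_command collection_set)

-- ===== LEMMAS AND PROOFS =====

-- A's foldl, characterised by the last "uid" item and the last non-"uid" item.
lemma foldA_char (cs : List (String × String)) (s : Option String × Option String × Option String) :
    cs.foldl stepA s =
      (((cs.reverse.find? (fun kv => kv.1 == "uid")).map Prod.snd).or s.1,
       match cs.reverse.find? (fun kv => kv.1 != "uid") with
       | some kv => (some kv.1, some kv.2)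
       | none => s.2) := by
  induction cs generalizing s with
  | nil => simp
  | cons a rest ih =>
      simp only [List.foldl_cons, ih, List.reverse_cons, List.find?_append]
      by_cases h : a.1 = "uid"
      · cases hx : rest.reverse.find? (fun kv => kv.1 == "uid") <;>
          cases hy : rest.reverse.find? (fun kv => kv.1 != "uid") <;>
          simp [stepA, h, Option.or]
      · cases hx : rest.reverse.find? (fun kv => kv.1 == "uid") <;>
          cases hy : rest.reverse.find? (fun kv => kv.1 != "uid") <;>
          simp [stepA, h, Option.or]

lemma get?_mk_eq_find? (cs : List (String × String)) (x : String) :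
    (PySem.Dict.mk cs).get? x = (cs.find? (fun kv => kv.1 == x)).map Prod.snd := by
  induction cs with
  | nil => simp [PySem.Dict.get?]
  | cons a rest ih =>
      obtain ⟨k0, v0⟩ := a
      rw [PySem.Dict.get?_mk_cons, List.find?_cons]
      by_cases h : k0 = x
      · simp [h]
      · have hb : (k0 == x) = false := by simp [h]
        simp [hb, ih]

-- under unique keys, the unique pair with a given key is found
lemma find?_of_mem_nodup (cs : List (String × String)) (k v : String)
    (hnd : (cs.map Prod.fst).Nodup) (hmem : (k, v) ∈ cs) :
    cs.find? (fun kv => kv.1 == k) = some (k, v) := by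
  induction cs with
  | nil => simp at hmem
  | cons a rest ih =>
      rcases List.mem_cons.1 hmem with h | h
      · subst h
        exact List.find?_cons_of_pos (by simp)
      · rw [List.map_cons, List.nodup_cons] at hnd
        have hk : k ∈ rest.map Prod.fst := List.mem_map.2 ⟨(k, v), h, rfl⟩
        have ha : a.1 ≠ k := fun he => hnd.1 (he ▸ hk)
        rw [List.find?_cons_of_neg (by simpa using ha)]
        exact ih hnd.2 h
      
-- under unique keys, searching for a key forwards or backwards finds the same pair
lemma find?_key_reverse (cs : List (String × String)) (k : String)
    (hnd : (cs.map Prod.fst).Nodup) :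
    cs.reverse.find? (fun kv => kv.1 == k) = cs.find? (fun kv => kv.1 == k) := by
  cases hr : cs.reverse.find? (fun kv => kv.1 == k) with
  | none =>
      cases hf : cs.find? (fun kv => kv.1 == k) with
      | none => rfl
      | some kv =>
          have hm : kv ∈ cs := List.mem_of_find?_eq_some hf
          have hp := List.find?_some hf
          have := List.find?_eq_none.1 hr kv (List.mem_reverse.2 hm)
          exact absurd hp this
  | some kv =>
      have hm : kv ∈ cs := List.mem_reverse.1 (List.mem_of_find?_eq_some hr)
      have hp := List.find?_some hr
      have hk : kv.1 = k := by simpa using hp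
      have := find?_of_mem_nodup cs kv.1 kv.2 hnd hm
      rw [hk] at this
      rw [this, ← hk]

lemma revScanB_eq_find? (l : List (String × String)) :
    revScanB l = l.find? (fun kv => kv.1 != "uid") := by
  induction l with
  | nil => rfl
  | cons a rest ih =>
      rw [List.find?_cons]
      by_cases h : a.1 = "uid"
      · have hb : (a.1 != "uid") = false := by simp [h]
        rw [hb]
        simp [revScanB, hb, ih]
      · have hb : (a.1 != "uid") = true := by simp [h]
        rw [hb]
        simp [revScanB, hb]

-- ===== VERDICT (by name: the statement is the Claim_ definition above) =====
theorem read_command_spec : Claim_equal_read_command := by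
  intro cs _ hpre
  unfold Spec_read_command read_command read_command_alt
  rw [foldA_char, revScanB_eq_find?]
  have huid : (PySem.Dict.mk cs).get? "uid" =
      ((cs.reverse.find? (fun kv => kv.1 == "uid")).map Prod.snd).or none := by
    rw [get?_mk_eq_find?, find?_key_reverse cs "uid" hpre, Option.or_none]
  cases hy : cs.reverse.find? (fun kv => kv.1 != "uid") with
  | none => simp [huid]
  | some kv =>
      have hm : kv ∈ cs := List.mem_reverse.1 (List.mem_of_find?_eq_some hy)
      have hval : (PySem.Dict.mk cs).get? kv.1 = some kv.2 := by
        rw [get?_mk_eq_find?, find?_of_mem_nodup cs kv.1 kv.2 hpre hm]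
        rfl
      simp [huid, hval]
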